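-- pv_equiv track=rewrite | github.com/leon060802/djangolegalAI | typocorrection/utilities.py | highlight_errors
-- ===== SOURCE A (Python) =====
-- def highlight_errors(original_text, errors):
--     """
--     Highlight specific erroneous characters in the original text.
--     :param original_text: The original text.
--     :param errors: List of (index, character) tuples.
--     :return: Text with errors wrapped in <span> tags.
--     """
--     highlighted_text = ""
--     for i, char in enumerate(original_text):
--         # If this character's index is in errors, wrap it in <span>
--         if i in [error[0] for error in errors]:
--             highlighted_text += f'<span class="error">{char}</span>'
--         else:
--             highlighted_text += char
--     return highlighted_text
-- ===== SOURCE B (Python) =====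
-- def highlight_errors(original_text, errors):
--     """Scatter edits into a char buffer indexed by error position, then join once."""
--     result = list(original_text)
--     n = len(result)
--     for idx, _char in errors:
--         if 0 <= idx < n:
--             result[idx] = f'<span class="error">{original_text[idx]}</span>'
--     return "".join(result)
-- ===== Notes on version B (the rewrite author's own statement) =====
-- stated objective: faster
-- what changed: Instead of scanning every character and rebuilding the list of error indices for a membership test at each position, B scatters the span-wrapped replacements directly into a mutable char buffer indexed by error position and joins once.
import Mathlib
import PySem

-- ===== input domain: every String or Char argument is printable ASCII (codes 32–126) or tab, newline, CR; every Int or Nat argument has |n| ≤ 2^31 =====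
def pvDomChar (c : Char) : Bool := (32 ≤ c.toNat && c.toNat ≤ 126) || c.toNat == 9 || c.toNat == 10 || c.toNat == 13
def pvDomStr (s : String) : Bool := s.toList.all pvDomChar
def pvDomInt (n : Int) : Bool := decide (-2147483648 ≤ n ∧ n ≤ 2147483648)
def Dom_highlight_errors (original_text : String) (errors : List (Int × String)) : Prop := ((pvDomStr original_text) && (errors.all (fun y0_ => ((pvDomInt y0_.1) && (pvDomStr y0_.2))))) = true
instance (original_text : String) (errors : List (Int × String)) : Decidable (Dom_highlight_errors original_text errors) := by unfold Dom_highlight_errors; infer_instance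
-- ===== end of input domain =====

-- B replaces A's per-character membership scan over the error indices by a single scatter pass
-- over the errors into a char buffer (objective: faster, O(n+m) vs O(n*m)).

-- ===== PORT A =====
-- f'<span class="error">{c}</span>' as a char list
def pvSpan (c : Char) : List Char :=
  "<span class=\"error\">".toList ++ [c] ++ "</span>".toList

-- A: scan the text; at each position test membership of the index in [e[0] for e in errors]
def highlight_errors (original_text : String) (errors : List (Int × String)) : String :=
  String.mk
    ((PySem.List.enumerate original_text.toList).foldl
      (fun acc ic =>
        if ic.1 ∈ errors.map (fun e => e.1) then acc ++ pvSpan ic.2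
        else acc ++ [ic.2]) [])

-- ===== PORT B =====
-- B: buffer of one-char chunks; for each error in range, overwrite the chunk at that index
def highlight_errors_alt (original_text : String) (errors : List (Int × String)) : String :=
  let cs := original_text.toList
  let n : Int := (cs.length : Int)
  let buf := cs.map (fun c => [c])
  let buf := errors.foldl
    (fun (b : List (List Char)) e =>
      if 0 ≤ e.1 ∧ e.1 < n then b.set e.1.toNat (pvSpan (cs.getD e.1.toNat ' ')) else b)
    buf
  String.mk buf.flatten

-- ===== PRECONDITION & SPEC =====
def Spec_highlight_errors (original_text : String) (errors : List (Int × String)) (out : String) : Prop := out = highlight_errors_alt original_text errors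
instance (original_text : String) (errors : List (Int × String)) (out : String) : Decidable (Spec_highlight_errors original_text errors out) := by unfold Spec_highlight_errors; infer_instance

-- ===== CLAIM (what is proved, stated in full; the proofs are below) =====
def Claim_equal_highlight_errors : Prop := ∀ (original_text : String) (errors : List (Int × String)), Dom_highlight_errors original_text errors → Spec_highlight_errors original_text errors (highlight_errors original_text errors)

-- ===== LEMMAS AND PROOFS =====

-- 'acc += chunk' loop is the flattened map
theorem foldl_append_eq_flatten_map {α : Type} (g : α → List Char) :
    ∀ (l : List α) (acc : List Char),
      l.foldl (fun acc x => acc ++ g x) acc = acc ++ (l.map g).flatten := by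
  intro l
  induction l with
  | nil => simp
  | cons x xs ih => intro acc; simp [List.foldl_cons, ih]

-- the scatter loop preserves the buffer length
theorem scatter_length (cs : List Char) (errors : List (Int × String)) :
    ∀ (b : List (List Char)),
      (errors.foldl
        (fun (b : List (List Char)) e =>
          if 0 ≤ e.1 ∧ e.1 < (cs.length : Int) then
            b.set e.1.toNat (pvSpan (cs.getD e.1.toNat ' ')) else b)
        b).length = b.length := by
  induction errors with
  | nil => intro b; rfl
  | cons e es ih =>
      intro b
      simp only [List.foldl_cons]
      rw [ih]
      split_ifs <;> simp

-- chunk at position j after the scatter loop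
theorem scatter_getD (cs : List Char) (errors : List (Int × String)) :
    ∀ (b : List (List Char)) (j : Nat), b.length = cs.length → j < cs.length →
      (errors.foldl
        (fun (b : List (List Char)) e =>
          if 0 ≤ e.1 ∧ e.1 < (cs.length : Int) then
            b.set e.1.toNat (pvSpan (cs.getD e.1.toNat ' ')) else b)
        b).getD j [] =
      if (j : Int) ∈ errors.map (fun e => e.1) then pvSpan (cs.getD j ' ')
      else b.getD j [] := by
  induction errors with
  | nil => intro b j _ _; simp
  | cons e es ih =>
      intro b j hb hj
      simp only [List.foldl_cons, List.map_cons, List.mem_cons]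
      by_cases he : e.1 = (j : Int)
      · have hguard : 0 ≤ e.1 ∧ e.1 < (cs.length : Int) := by
          constructor <;> omega
        rw [if_pos hguard]
        have htn : e.1.toNat = j := by omega
        rw [ih _ j (by simp [hb]) hj]
        by_cases hmem : (j : Int) ∈ es.map (fun e => e.1)
        · simp [hmem, he]
        · simp [hmem, he, List.getD_eq_getElem?_getD, hb, hj]
      · rw [ih _ j (by split_ifs <;> simp [hb]) hj]
        have hbase : (if 0 ≤ e.1 ∧ e.1 < (cs.length : Int) then
            b.set e.1.toNat (pvSpan (cs.getD e.1.toNat ' ')) else b).getD j [] = b.getD j [] := by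
          split_ifs with hg
          · have : e.1.toNat ≠ j := by omega
            simp [List.getD_eq_getElem?_getD, List.getElem?_set_ne this]
          · rfl
        rw [hbase]
        by_cases hmem : (j : Int) ∈ es.map (fun e => e.1)
        · simp [hmem]
        · rw [if_neg hmem, if_neg]
          rintro (h | h)
          · exact he h.symm
          · exact hmem h

-- ===== VERDICT (by name: the statement is the Claim_ definition above) =====
theorem highlight_errors_spec : Claim_equal_highlight_errors := by
  intro t errors _
  unfold Spec_highlight_errors highlight_errors highlight_errors_alt
  dsimp only
  set cs := t.toList with hcs
  have hA : (fun (acc : List Char) (ic : Int × Char) =>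
        if ic.1 ∈ errors.map (fun e => e.1) then acc ++ pvSpan ic.2 else acc ++ [ic.2]) =
      (fun acc ic => acc ++
        (if ic.1 ∈ errors.map (fun e => e.1) then pvSpan ic.2 else [ic.2])) := by
    funext acc ic; split_ifs <;> rfl
  rw [hA, foldl_append_eq_flatten_map]
  simp only [List.nil_append]
  congr 1
  congr 1
  apply List.ext_getElem
  · rw [List.length_map, PySem.List.length_enumerate,
        scatter_length cs errors, List.length_map]
  · intro j hj1 hj2
    have hjlen : j < cs.length := by
      simpa [PySem.List.length_enumerate] using hj1
    have hlen : (cs.map (fun c => [c])).length = cs.length := by simp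
    have hkey := scatter_getD cs errors (cs.map (fun c => [c])) j hlen hjlen
    rw [List.getElem_map, PySem.List.getElem_enumerate]
    have hget : (errors.foldl
        (fun (b : List (List Char)) e =>
          if 0 ≤ e.1 ∧ e.1 < (cs.length : Int) then
            b.set e.1.toNat (pvSpan (cs.getD e.1.toNat ' ')) else b)
        (cs.map (fun c => [c])))[j] =
        (errors.foldl
        (fun (b : List (List Char)) e =>
          if 0 ≤ e.1 ∧ e.1 < (cs.length : Int) then
            b.set e.1.toNat (pvSpan (cs.getD e.1.toNat ' ')) else b)
        (cs.map (fun c => [c]))).getD j [] := by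
      rw [List.getD_eq_getElem?_getD, List.getElem?_eq_getElem hj2]
      rfl
    rw [hget, hkey]
    simp only [zero_add]
    split_ifs with hmem
    · simp [List.getD_eq_getElem?_getD, List.getElem?_eq_getElem hjlen]
    · simp [List.getD_eq_getElem?_getD, List.getElem?_map,
            List.getElem?_eq_getElem hjlen]
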